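-- pv_equiv track=rewrite | github.com/RuRuo0/Datasets | core/aux_tools/parser.py | inverse_parse_logic
-- ===== SOURCE A (Python) =====
-- def inverse_parse_logic(predicate, item, para_len):
--     """
--     Inverse parse conditions of logic form to CDL.
--     Note that this function also used by Solver for theorem inverse parse.
--     >> inverse_parse_logic(Parallel, ('A', 'B', 'C', 'D'), [2, 2])
--     'Parallel(AB,CD)'
--     """
--     if len(para_len) == 1:  # no need add ','
--         return predicate + "(" + "".join(item) + ")"
--     else:  # relation
--         result = []
--         i = 0
--         for l in para_len:
--             result.append("")
--             for _ in range(l):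
--                 result[-1] += item[i]
--                 i += 1
--         return predicate + "(" + ",".join(result) + ")"
-- ===== SOURCE B (Python) =====
-- def inverse_parse_logic(predicate, item, para_len):
--     """Format grouped items as CDL: one offset-driven slicing pass, no special case.
--     A group length l means max(l, 0) items (as range(l) does)."""
--     parts = []
--     start = 0
--     for l in para_len:
--         n = max(l, 0)
--         parts.append("".join(item[start:start + n]))
--         start += n
--     return predicate + "(" + ",".join(parts) + ")"
-- ===== Notes on version B (the rewrite author's own statement) =====
-- stated objective: simpler
-- what changed: Replaced A's len==1 special-case branch and nested index-incrementing inner loop by a single offset-driven slicing pass (one chunk slice + join per group).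
-- intended difference: When para_len is a single group [l] that undercounts item (max(l,0) < len(item)) and some item beyond the declared ones is nonempty, A's special-case branch joins ALL of item, ignoring the declared length, while B keeps only the declared items, consistent with A's own multi-group behaviour; B's is the intended value. — e.g. on inverse_parse_logic("P", ["a", "b"], [1]): A returns "P(ab)", B returns "P(a)"
import Mathlib
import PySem

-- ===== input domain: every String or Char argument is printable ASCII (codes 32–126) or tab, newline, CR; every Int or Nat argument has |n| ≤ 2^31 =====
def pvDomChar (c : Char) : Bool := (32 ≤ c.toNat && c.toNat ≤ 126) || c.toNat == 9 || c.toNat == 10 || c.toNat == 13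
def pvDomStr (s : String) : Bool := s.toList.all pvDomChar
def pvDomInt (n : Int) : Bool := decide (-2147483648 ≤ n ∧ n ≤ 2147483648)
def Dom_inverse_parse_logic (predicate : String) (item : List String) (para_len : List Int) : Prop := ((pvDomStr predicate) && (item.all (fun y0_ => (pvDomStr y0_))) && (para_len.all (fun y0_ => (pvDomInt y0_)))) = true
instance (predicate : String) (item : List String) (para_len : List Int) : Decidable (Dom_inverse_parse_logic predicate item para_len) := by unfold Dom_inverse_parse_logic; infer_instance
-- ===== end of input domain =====

-- B replaces A's len==1 special case and nested index-incrementing loop by one offset-driven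
-- slicing pass (simpler); on single-group calls whose declared length l undercounts item, A joins
-- all of item while B keeps the declared l items (stated as D_ below).

-- ===== PORT A =====
-- inner loop body: result[-1] += item[i]; i += 1 (item[i] raises IndexError out of range;
-- Pre_ excludes those inputs, so the "" default of pyGetD is never reached)
def pvInnerA (item : List String) (st : List String × Int) (_ : Int) : List String × Int :=
  (st.1.dropLast ++ [st.1.getLast?.getD "" ++ PySem.List.pyGetD item st.2 ""], st.2 + 1)

-- one outer iteration: result.append(""); for _ in range(l): …
def pvStepA (item : List String) (st : List String × Int) (l : Int) : List String × Int :=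
  (PySem.List.pyRange 0 l 1).foldl (pvInnerA item) (st.1 ++ [""], st.2)

def inverse_parse_logic (predicate : String) (item : List String) (para_len : List Int) : String :=
  if para_len.length == 1 then
    predicate ++ "(" ++ PySem.Str.join "" item ++ ")"
  else
    predicate ++ "(" ++ PySem.Str.join "," (para_len.foldl (pvStepA item) ([], 0)).1 ++ ")"

-- ===== PORT B =====
-- one iteration of B's loop: n = max(l, 0); parts.append("".join(item[start:start+n])); start += n
def pvStepB (item : List String) (st : List String × Int) (l : Int) : List String × Int :=
  let n := max l 0
  (st.1 ++ [PySem.Str.join "" (PySem.List.slice item (some st.2) (some (st.2 + n)))], st.2 + n)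

def inverse_parse_logic_alt (predicate : String) (item : List String) (para_len : List Int) : String :=
  predicate ++ "(" ++ PySem.Str.join "," (para_len.foldl (pvStepB item) ([], 0)).1 ++ ")"

-- ===== PRECONDITION & SPEC =====
-- Pre_ excludes exactly the inputs where A raises: multi-group (or zero-group) calls whose clamped
-- group lengths demand more items than item holds make A's item[i] raise IndexError.
def Pre_inverse_parse_logic (predicate : String) (item : List String) (para_len : List Int) : Prop :=
  para_len.length ≠ 1 → (para_len.map (fun l => max l 0)).sum ≤ (item.length : Int)
instance (predicate : String) (item : List String) (para_len : List Int) : Decidable (Pre_inverse_parse_logic predicate item para_len) := by unfold Pre_inverse_parse_logic; infer_instance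

def pvWitness_inverse_parse_logic : String × List String × List Int :=
  ("Parallel", ["A", "B", "C", "D"], [2, 2])

-- When para_len is a single group [l] that undercounts item (max(l,0) < len(item)) and some item
-- beyond the declared ones is nonempty, A's special-case branch joins ALL of item, ignoring the
-- declared length, while B keeps only the declared items, consistent with A's own multi-group
-- behaviour; B's is the intended value.
def D_inverse_parse_logic (predicate : String) (item : List String) (para_len : List Int) : Prop :=
  para_len.length = 1 ∧ max para_len.headI 0 < (item.length : Int) ∧
    (item.drop para_len.headI.toNat).any (fun s => s ≠ "") = true
instance (predicate : String) (item : List String) (para_len : List Int) : Decidable (D_inverse_parse_logic predicate item para_len) := by unfold D_inverse_parse_logic; infer_instance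

def Spec_inverse_parse_logic (predicate : String) (item : List String) (para_len : List Int) (out : String) : Prop := ¬ D_inverse_parse_logic predicate item para_len → out = inverse_parse_logic_alt predicate item para_len
instance (predicate : String) (item : List String) (para_len : List Int) (out : String) : Decidable (Spec_inverse_parse_logic predicate item para_len out) := by unfold Spec_inverse_parse_logic; infer_instance

def pvDiffWitness_inverse_parse_logic : String × List String × List Int := ("P", ["a", "b"], [1])
def pvDiffWitnessOut_inverse_parse_logic : String × String := ("P(ab)", "P(a)")

-- ===== CLAIM (what is proved, stated in full; the proofs are below) =====
def Claim_unchanged_inverse_parse_logic : Prop := ∀ (predicate : String) (item : List String) (para_len : List Int), Dom_inverse_parse_logic predicate item para_len → Pre_inverse_parse_logic predicate item para_len → Spec_inverse_parse_logic predicate item para_len (inverse_parse_logic predicate item para_len)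
def Claim_changed_inverse_parse_logic : Prop := Dom_inverse_parse_logic (pvDiffWitness_inverse_parse_logic.1) (pvDiffWitness_inverse_parse_logic.2.1) (pvDiffWitness_inverse_parse_logic.2.2) ∧ Pre_inverse_parse_logic (pvDiffWitness_inverse_parse_logic.1) (pvDiffWitness_inverse_parse_logic.2.1) (pvDiffWitness_inverse_parse_logic.2.2) ∧ D_inverse_parse_logic (pvDiffWitness_inverse_parse_logic.1) (pvDiffWitness_inverse_parse_logic.2.1) (pvDiffWitness_inverse_parse_logic.2.2) ∧ inverse_parse_logic (pvDiffWitness_inverse_parse_logic.1) (pvDiffWitness_inverse_parse_logic.2.1) (pvDiffWitness_inverse_parse_logic.2.2) = pvDiffWitnessOut_inverse_parse_logic.1 ∧ inverse_parse_logic_alt (pvDiffWitness_inverse_parse_logic.1) (pvDiffWitness_inverse_parse_logic.2.1) (pvDiffWitness_inverse_parse_logic.2.2) = pvDiffWitnessOut_inverse_parse_logic.2 ∧ pvDiffWitnessOut_inverse_parse_logic.1 ≠ pvDiffWitnessOut_inverse_parse_logic.2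
def Claim_exact_inverse_parse_logic : Prop := ∀ (predicate : String) (item : List String) (para_len : List Int), Dom_inverse_parse_logic predicate item para_len → Pre_inverse_parse_logic predicate item para_len → D_inverse_parse_logic predicate item para_len → inverse_parse_logic predicate item para_len ≠ inverse_parse_logic_alt predicate item para_len

-- ===== LEMMAS AND PROOFS =====

-- "".join over List Char is flatten
lemma charsJoinNil (ps : List (List Char)) : PySem.Chars.join [] ps = ps.flatten := by
  induction ps with
  | nil => simp [PySem.Chars.join_nil]
  | cons p rest ih =>
    cases rest with
    | nil => simp [PySem.Chars.join_singleton]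
    | cons q rest' => simp [PySem.Chars.join_cons_cons, ih]

lemma strJoinNil_toList (ps : List String) :
    (PySem.Str.join "" ps).toList = (ps.map String.toList).flatten := by
  rw [PySem.Str.toList_join]
  simp [charsJoinNil]

lemma strJoinNil_append_singleton (ps : List String) (x : String) :
    PySem.Str.join "" (ps ++ [x]) = PySem.Str.join "" ps ++ x := by
  apply String.toList_inj.mp
  rw [String.toList_append, strJoinNil_toList, strJoinNil_toList]
  simp

lemma strJoinNil_nil : PySem.Str.join "" ([] : List String) = "" := by
  apply String.toList_inj.mp
  rw [strJoinNil_toList]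
  simp

-- A's inner loop: starting at index i with the group accumulator acc last in the list,
-- l iterations append "".join(item[i:i+l]) to acc and advance i by l.
lemma innerA_spec (item : List String) (n : Nat) :
    ∀ (res : List String) (acc : String) (i : Nat), i + n ≤ item.length →
    (PySem.List.pyRange 0 (n : Int) 1).foldl (pvInnerA item) (res ++ [acc], (i : Int))
      = (res ++ [acc ++ PySem.Str.join "" ((item.drop i).take n)], (i : Int) + n) := by
  induction n with
  | zero =>
    intro res acc i _
    rw [show ((0 : Nat) : Int) = 0 by norm_num, PySem.List.pyRange_one_eq_nil (by omega)]
    simp [strJoinNil_nil]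
  | succ n ih =>
    intro res acc i h
    have hcast : ((n + 1 : Nat) : Int) = (n : Int) + 1 := by push_cast; ring
    rw [hcast, PySem.List.pyRange_one_succ_right (by positivity), List.foldl_append,
      ih res acc i (by omega)]
    have hlt : i + n < item.length := by omega
    simp only [List.foldl_cons, List.foldl_nil, pvInnerA]
    rw [List.dropLast_concat, List.getLast?_concat]
    have hidx : ((i : Int) + (n : Int)) = ((i + n : Nat) : Int) := by push_cast; ring
    rw [hidx, PySem.List.pyGetD_natCast]
    have hget : (List.drop i item).take (n + 1)
        = (List.drop i item).take n ++ [item[i + n]'hlt] := by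
      rw [List.take_add_one]
      congr 1
      rw [List.getElem?_drop]
      simp [List.getElem?_eq_getElem hlt]
    simp only [Option.getD_some, hget, strJoinNil_append_singleton, Prod.mk.injEq]
    constructor
    · rw [List.getD_eq_getElem?_getD, List.getElem?_eq_getElem hlt]
      simp [String.append_assoc]
    · push_cast; ring

-- one outer iteration of A equals one iteration of B (both append the group's join, advance by l)
lemma stepA_eq_stepB (item : List String) (res : List String) (i : Nat) (l : Int)
    (hle : (i : Int) + max l 0 ≤ (item.length : Int)) :
    pvStepA item (res, (i : Int)) l = pvStepB item (res, (i : Int)) l := by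
  have hmax : ((l.toNat : Nat) : Int) = max l 0 := Int.ofNat_toNat l
  have hrange : PySem.List.pyRange 0 l 1 = PySem.List.pyRange 0 ((l.toNat : Nat) : Int) 1 := by
    rcases (by omega : 0 ≤ l ∨ l < 0) with h | h
    · rw [Int.toNat_of_nonneg h]
    · rw [PySem.List.pyRange_one_eq_nil (by omega), PySem.List.pyRange_one_eq_nil (by omega)]
  simp only [pvStepA, pvStepB, ← hmax]
  rw [hrange, innerA_spec item l.toNat res "" i (by omega), PySem.List.slice_natCast_add]
  simp [String.empty_append]

-- the two folds agree whenever the clamped group lengths fit in item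
lemma fold_eq (item : List String) (ls : List Int) :
    ∀ (res : List String) (i : Nat),
    (i : Int) + (ls.map (fun l => max l 0)).sum ≤ (item.length : Int) →
    ls.foldl (pvStepA item) (res, (i : Int)) = ls.foldl (pvStepB item) (res, (i : Int)) := by
  induction ls with
  | nil => intro res i _; rfl
  | cons l rest ih =>
    intro res i hsum
    have hrest : 0 ≤ (rest.map (fun l => max l 0)).sum := by
      apply List.sum_nonneg
      intro x hx
      obtain ⟨y, _, rfl⟩ := List.mem_map.mp hx
      exact le_max_right y 0
    simp only [List.map_cons, List.sum_cons] at hsum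
    have hmax : ((l.toNat : Nat) : Int) = max l 0 := Int.ofNat_toNat l
    rw [List.foldl_cons, List.foldl_cons, stepA_eq_stepB item res i l (by omega)]
    have hstep : pvStepB item (res, (i : Int)) l
        = (res ++ [PySem.Str.join ""
              (PySem.List.slice item (some (i : Int)) (some ((i : Int) + max l 0)))],
            ((i + l.toNat : Nat) : Int)) := by
      simp only [pvStepB, Prod.mk.injEq]
      refine ⟨?_, ?_⟩ <;> first | trivial | (push_cast; omega)
    rw [hstep, ih _ (i + l.toNat) (by push_cast; omega)]

-- ",".join of a single part is that part
lemma strJoin_singleton (sep : String) (x : String) : PySem.Str.join sep [x] = x := by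
  apply String.toList_inj.mp
  rw [PySem.Str.toList_join]
  simp [PySem.Chars.join_singleton]

-- B on a single group [l]: the one part is "".join(item[:max(l,0)])
lemma alt_single (predicate : String) (item : List String) (l : Int) :
    inverse_parse_logic_alt predicate item [l]
      = predicate ++ "(" ++ PySem.Str.join "" (item.take l.toNat) ++ ")" := by
  have hmax : ((l.toNat : Nat) : Int) = max l 0 := Int.ofNat_toNat l
  unfold inverse_parse_logic_alt pvStepB
  rw [List.foldl_cons, List.foldl_nil]
  simp only [← hmax]
  rw [show ((0 : Int) = ((0 : Nat) : Int)) from rfl, PySem.List.slice_natCast_add]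
  simp only [List.drop_zero, List.nil_append, strJoin_singleton]

-- ===== VERDICT (by name: the statement is the Claim_ definition above) =====
theorem inverse_parse_logic_spec : Claim_unchanged_inverse_parse_logic := by
  intro predicate item para_len _ hpre hnD
  by_cases h1 : para_len.length = 1
  · -- single group: A joins all of item; ¬D_ forces the slice to cover all nonempty items
    obtain ⟨l, rfl⟩ : ∃ l : Int, para_len = [l] := by
      match para_len, h1 with | [l], _ => exact ⟨l, rfl⟩
    rw [alt_single predicate item l]
    unfold inverse_parse_logic
    simp only [List.length_cons, List.length_nil, beq_self_eq_true, if_true]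
    congr 2
    by_cases hlen : max l 0 < (item.length : Int)
    · -- ¬D_ leaves only: every dropped item is empty
      have hall : ∀ s ∈ item.drop l.toNat, s = "" := by
        intro s hs
        by_contra hne
        exact hnD ⟨by simp, by simpa using hlen,
          List.any_eq_true.mpr ⟨s, hs, by simpa using hne⟩⟩
      calc PySem.Str.join "" item
          = PySem.Str.join "" (item.take l.toNat ++ item.drop l.toNat) := by
            rw [List.take_append_drop]
        _ = PySem.Str.join "" (item.take l.toNat) := by
            apply String.toList_inj.mp
            rw [strJoinNil_toList, strJoinNil_toList, List.map_append, List.flatten_append]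
            rw [show ((item.drop l.toNat).map String.toList).flatten = [] from by
              rw [List.flatten_eq_nil_iff]
              intro cs hcs
              obtain ⟨s, hs, rfl⟩ := List.mem_map.mp hcs
              rw [hall s hs]; rfl]
            simp
    · rw [List.take_of_length_le (by omega)]
  · -- multi group: the two folds coincide
    unfold inverse_parse_logic inverse_parse_logic_alt
    rw [if_neg (by simpa using h1)]
    rw [show (([], 0) : List String × Int) = (([] : List String), ((0 : Nat) : Int)) from rfl,
      fold_eq item para_len [] 0 (by simpa using hpre h1)]

theorem inverse_parse_logic_changed : Claim_changed_inverse_parse_logic := by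
  unfold Claim_changed_inverse_parse_logic; decide

theorem inverse_parse_logic_tight : Claim_exact_inverse_parse_logic := by
  intro predicate item para_len _ hpre hD heq
  obtain ⟨h1, hlt, hany⟩ := hD
  obtain ⟨l, rfl⟩ : ∃ l : Int, para_len = [l] := by
    match para_len, h1 with | [l], _ => exact ⟨l, rfl⟩
  simp only [List.headI_cons] at hlt hany
  rw [alt_single predicate item l] at heq
  unfold inverse_parse_logic at heq
  simp only [List.length_cons, List.length_nil, beq_self_eq_true, if_true] at heq
  -- compare lengths of the two results
  have hlen := congrArg (fun s => s.toList.length) heq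
  simp only [String.toList_append, List.length_append, strJoinNil_toList] at hlen
  have hitem : item = item.take l.toNat ++ item.drop l.toNat := (List.take_append_drop _ _).symm
  rw [hitem, List.map_append, List.flatten_append, List.length_append] at hlen
  have hdrop : ((item.drop l.toNat).map String.toList).flatten ≠ [] := by
    rw [Ne, List.flatten_eq_nil_iff]
    intro hall
    obtain ⟨s, hs, hne⟩ := List.any_eq_true.mp hany
    have := hall s.toList (List.mem_map.mpr ⟨s, hs, rfl⟩)
    apply (by simpa using hne : s ≠ "")
    apply String.toList_inj.mp
    rw [this]; rfl
  have : 0 < ((item.drop l.toNat).map String.toList).flatten.length :=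
    List.length_pos_iff.mpr hdrop
  rw [← hitem] at hlen
  omega
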